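-- pv_equiv track=rewrite | github.com/danieltal112/Nonogram-game | nonogram.py | intersection_row
-- ===== SOURCE A (Python) =====
-- def intersection_row(rows):
--     """This function receives a list of rows and returns a row that is
--      common to all the rows"""
--     if len(rows) == 1:
--         return rows[0]
--     if len(rows) > 0:
--         lst = []
--         for i in range(len(rows[0])):
--             flag = True
--             for j in range(len(rows) - 1):
--                 if rows[j][i] != rows[j + 1][i]:
--                     flag = False
--             if flag is True:
--                 lst.append(rows[j][i])
--             else:
--                 lst.append(-1)
--         return lst
-- ===== SOURCE B (Python) =====
-- def intersection_row(rows):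
--     """This function receives a list of rows and returns a row that is
--      common to all the rows"""
--     if len(rows) == 1:
--         return rows[0]
--     if rows:
--         acc = rows[0]
--         for row in rows[1:]:
--             acc = [a if a == b else -1 for a, b in zip(acc, row)]
--         return acc
-- ===== Notes on version B (the rewrite author's own statement) =====
-- stated objective: alternative
-- what changed: Replaces A's column-major double loop (per-column scan over all adjacent row pairs with indexed access) with a single row-major left fold that merges each row into an accumulator via zip, keeping equal cells and writing -1 on mismatch (-1 is absorbing, so the fold yields the common value iff all rows agree).
-- outside the precondition, e.g. on intersection_row([]): A returns None, B returns None
import Mathlib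
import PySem

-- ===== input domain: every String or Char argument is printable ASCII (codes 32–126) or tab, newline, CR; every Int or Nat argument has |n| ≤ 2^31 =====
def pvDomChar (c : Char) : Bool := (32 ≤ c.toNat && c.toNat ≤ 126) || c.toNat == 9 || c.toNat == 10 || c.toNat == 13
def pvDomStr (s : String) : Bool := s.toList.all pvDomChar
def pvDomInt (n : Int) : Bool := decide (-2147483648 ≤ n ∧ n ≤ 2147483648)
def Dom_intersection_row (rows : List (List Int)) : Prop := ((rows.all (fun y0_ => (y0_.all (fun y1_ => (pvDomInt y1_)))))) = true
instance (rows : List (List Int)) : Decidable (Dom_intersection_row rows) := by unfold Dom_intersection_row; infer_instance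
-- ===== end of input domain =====

-- B replaces A's column-major double loop with a single row-major left fold that merges
-- each row into an accumulator (equal cells kept, -1 on mismatch): a different traversal, same cost.


-- ===== PORT A =====
def intersection_row (rows : List (List Int)) : List Int :=
  if rows.length = 1 then rows.headD []
  else if rows.length > 0 then
    (PySem.List.pyRange 0 ((PySem.List.pyGetD rows 0 []).length : Int)).foldl
      (fun lst i =>
        let flag := (PySem.List.pyRange 0 ((rows.length : Int) - 1)).foldl
          (fun flag j =>
            if PySem.List.pyGetD (PySem.List.pyGetD rows j []) i 0 ≠
               PySem.List.pyGetD (PySem.List.pyGetD rows (j + 1) []) i 0 then false else flag)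
          true
        -- after the inner loop, Python's j holds its last value len(rows) - 2
        lst ++ [if flag then
                  PySem.List.pyGetD (PySem.List.pyGetD rows ((rows.length : Int) - 2) []) i 0
                else -1])
      []
  else []  -- Python falls through returning None; excluded by Pre_

-- ===== PORT B =====
-- one merge step: [a if a == b else -1 for a, b in zip(acc, row)]
def mergeRow (acc row : List Int) : List Int :=
  (acc.zip row).map (fun p => if p.1 = p.2 then p.1 else -1)

def intersection_row_alt (rows : List (List Int)) : List Int :=
  if rows.length = 1 then rows.headD []
  else if rows.length > 0 then
    match rows with
    | [] => []
    | r :: rs => rs.foldl mergeRow r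
  else []  -- Python falls through returning None; excluded by Pre_

-- ===== PRECONDITION & SPEC =====
-- Pre_ excludes the empty list (A returns None, not a list) and, for two or more rows,
-- any input whose first row is longer than some other row (A raises IndexError there).
def Pre_intersection_row (rows : List (List Int)) : Prop :=
  rows ≠ [] ∧ ∀ r ∈ rows, (rows.headD []).length ≤ r.length
instance (rows : List (List Int)) : Decidable (Pre_intersection_row rows) := by
  unfold Pre_intersection_row; infer_instance

def pvWitness_intersection_row : List (List Int) := [[1, 2], [1, 3]]

def Spec_intersection_row (rows : List (List Int)) (out : List Int) : Prop :=
  out = intersection_row_alt rows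
instance (rows : List (List Int)) (out : List Int) : Decidable (Spec_intersection_row rows out) := by
  unfold Spec_intersection_row; infer_instance

-- ===== CLAIM (what is proved, stated in full; the proofs are below) =====
def Claim_equal_intersection_row : Prop := ∀ (rows : List (List Int)), Dom_intersection_row rows → Pre_intersection_row rows → Spec_intersection_row rows (intersection_row rows)

-- ===== LEMMAS AND PROOFS =====

-- A's inner loop: a flag that is cleared on any mismatch is the 'all' of the negations
lemma foldl_flag {α : Type} (L : List α) (P : α → Prop) [DecidablePred P] (b : Bool) :
    L.foldl (fun fl j => if P j then false else fl) b = (b && L.all (fun j => decide ¬ P j)) := by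
  induction L generalizing b with
  | nil => simp
  | cons x xs ih =>
    simp only [List.foldl_cons, List.all_cons, ih]
    by_cases h : P x <;> simp [h]

-- one merge keeps the accumulator's length when the row is at least as long
lemma mergeRow_length (acc row : List Int) (h : acc.length ≤ row.length) :
    (mergeRow acc row).length = acc.length := by
  simp [mergeRow, List.length_zip, Nat.min_eq_left h]

lemma mergeRow_getD (acc row : List Int) (i : Nat) (hi : i < acc.length)
    (h : acc.length ≤ row.length) :
    (mergeRow acc row).getD i 0 =
      if acc.getD i 0 = row.getD i 0 then acc.getD i 0 else -1 := by
  have hiz : i < (acc.zip row).length := by simp [List.length_zip]; omega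
  have hir : i < row.length := by omega
  simp [mergeRow, List.getD_eq_getElem?_getD, hi, hir, List.getElem_zip]

-- the fold of mergeRow, pointwise: the accumulator's value where every row agrees, else -1
lemma foldl_merge_getD (rs : List (List Int)) (acc : List Int)
    (h : ∀ r ∈ rs, acc.length ≤ r.length) (i : Nat) (hi : i < acc.length) :
    (rs.foldl mergeRow acc).getD i 0 =
      if ∀ r ∈ rs, r.getD i 0 = acc.getD i 0 then acc.getD i 0 else -1 := by
  induction rs generalizing acc with
  | nil => simp
  | cons r rs ih =>
    have hr : acc.length ≤ r.length := h r (by simp)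
    have hlen : (mergeRow acc r).length = acc.length := mergeRow_length acc r hr
    have h' : ∀ r' ∈ rs, (mergeRow acc r).length ≤ r'.length := by
      intro r' hr'; rw [hlen]; exact h r' (by simp [hr'])
    have hi' : i < (mergeRow acc r).length := by omega
    rw [List.foldl_cons, ih (mergeRow acc r) h' hi', mergeRow_getD acc r i hi hr]
    by_cases heq : acc.getD i 0 = r.getD i 0
    · rw [if_pos heq]
      exact if_congr
        ⟨fun hall r' hr' => (List.mem_cons.mp hr').elim (fun h1 => h1 ▸ heq.symm)
           (fun h1 => hall r' h1),
         fun hall r' hr' => hall r' (List.mem_cons_of_mem _ hr')⟩ rfl rfl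
    · rw [if_neg heq]
      have hcond : ¬ ∀ r' ∈ r :: rs, r'.getD i 0 = acc.getD i 0 := by
        intro hc; exact heq ((hc r (by simp)).symm)
      rw [if_neg hcond]
      split_ifs <;> rfl

lemma foldl_merge_length (rs : List (List Int)) (acc : List Int)
    (h : ∀ r ∈ rs, acc.length ≤ r.length) :
    (rs.foldl mergeRow acc).length = acc.length := by
  induction rs generalizing acc with
  | nil => rfl
  | cons r rs ih =>
    have hr : acc.length ≤ r.length := h r (by simp)
    have hlen := mergeRow_length acc r hr
    rw [List.foldl_cons, ih (mergeRow acc r) (by intro r' hr'; rw [hlen]; exact h r' (by simp [hr'])), hlen]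

-- the fold as a map over column indices
lemma foldl_merge_eq_map (rs : List (List Int)) (acc : List Int)
    (h : ∀ r ∈ rs, acc.length ≤ r.length) :
    rs.foldl mergeRow acc =
      (List.range acc.length).map
        (fun i => if ∀ r ∈ rs, r.getD i 0 = acc.getD i 0 then acc.getD i 0 else -1) := by
  apply List.ext_getElem
  · simp [foldl_merge_length rs acc h]
  · intro i h1 h2
    have hi : i < acc.length := by simpa [foldl_merge_length rs acc h] using h1
    have := foldl_merge_getD rs acc h i hi
    rw [List.getD_eq_getElem?_getD, List.getElem?_eq_getElem h1] at this
    simpa using this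

-- adjacent equalities propagate to equality with the first element
lemma chain_to_head (h : Nat → Int) (n : Nat) (H : ∀ j, j + 1 < n → h j = h (j + 1)) :
    ∀ j, j < n → h j = h 0 := by
  intro j hj
  induction j with
  | zero => rfl
  | succ m ih => rw [← H m hj]; exact ih (by omega)

theorem intersection_row_spec : Claim_equal_intersection_row := by
  intro rows _ hpre
  obtain ⟨hne, hlen⟩ := hpre
  unfold Spec_intersection_row intersection_row intersection_row_alt
  match rows, hlen with
  | [], _ => exact absurd rfl hne
  | [r], _ => simp
  | r0 :: r1 :: rs, hlen =>
    have hlen1 : (r0 :: r1 :: rs).length ≠ 1 := by simp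
    have hpos : (r0 :: r1 :: rs).length > 0 := by simp
    simp only [hlen1, if_false, hpos, if_true]
    have hge : ∀ r ∈ r1 :: rs, r0.length ≤ r.length := by
      intro r hr; simpa using hlen r (List.mem_cons_of_mem _ hr)
    -- B side: the fold as a map over column indices
    rw [foldl_merge_eq_map (r1 :: rs) r0 hge]
    -- A side: outer loop over range(len(rows[0]))
    have h0 : PySem.List.pyGetD (r0 :: r1 :: rs) 0 [] = r0 := by
      simp [PySem.List.pyGetD_ofNat']
    rw [h0, PySem.List.pyRange_zero_nat, List.foldl_map,
        PySem.List.foldl_append_singleton_eq_map, List.nil_append]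
    apply List.map_congr_left
    intro k hk
    have hk' : k < r0.length := List.mem_range.mp hk
    -- abbreviate the column entries
    set h : Nat → Int := fun j => ((r0 :: r1 :: rs).getD j []).getD k 0 with hh
    -- rewrite A's inner loop into an 'all'
    have hcast : (((r0 :: r1 :: rs).length : Int) - 1) = (((r0 :: r1 :: rs).length - 1 : Nat) : Int) := by
      simp
    rw [hcast, PySem.List.pyRange_zero_nat, List.foldl_map, foldl_flag, Bool.true_and]
    -- one inner-loop comparison ↔ one adjacent equality of h
    have hstep : ∀ j : Nat,
        ((PySem.List.pyGetD (PySem.List.pyGetD (r0 :: r1 :: rs) (j : Int) []) (k : Int) 0 =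
          PySem.List.pyGetD (PySem.List.pyGetD (r0 :: r1 :: rs) ((j : Int) + 1) []) (k : Int) 0)
         ↔ (h j = h (j + 1))) := by
      intro j
      have hc1 : ((j : Int) + 1) = ((j + 1 : Nat) : Int) := by push_cast; ring
      rw [hc1, PySem.List.pyGetD_natCast, PySem.List.pyGetD_natCast,
          PySem.List.pyGetD_natCast, PySem.List.pyGetD_natCast]
    -- B's per-column condition ↔ equality of every h j with h 0
    have hmem : (∀ r ∈ r1 :: rs, r.getD k 0 = r0.getD k 0)
        ↔ (∀ j, j < (r0 :: r1 :: rs).length → h j = h 0) := by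
      constructor
      · intro hall j hj
        cases j with
        | zero => rfl
        | succ m =>
          have hm : (r0 :: r1 :: rs).getD (m + 1) [] ∈ r1 :: rs := by
            have : (r0 :: r1 :: rs).getD (m + 1) [] = (r1 :: rs).getD m [] := by simp
            rw [this]
            have hm' : m < (r1 :: rs).length := by simpa using hj
            rw [List.getD_eq_getElem?_getD, List.getElem?_eq_getElem hm']
            simp
          simpa [hh] using hall _ hm
      · intro hall r hr
        obtain ⟨j, hj, hje⟩ := List.mem_iff_getElem.mp hr
        have hje' : (r1 :: rs)[j]?.getD [] = r := by
          rw [List.getElem?_eq_getElem hj]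
          simpa using hje
        have := hall (j + 1) (by simpa using hj)
        simpa [hh, hje'] using this
    by_cases hall : ∀ j, j + 1 < (r0 :: r1 :: rs).length → h j = h (j + 1)
    · -- all rows agree at column k: A's flag is true, B keeps r0's value
      have hflag : (List.range ((r0 :: r1 :: rs).length - 1)).all
          (fun j : Nat => decide ¬(PySem.List.pyGetD (PySem.List.pyGetD (r0 :: r1 :: rs) (j : Int) []) (k : Int) 0 ≠
            PySem.List.pyGetD (PySem.List.pyGetD (r0 :: r1 :: rs) ((j : Int) + 1) []) (k : Int) 0)) = true := by
        simp only [List.all_eq_true, List.mem_range]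
        intro m hm
        simpa using (hstep m).mpr (hall m (by omega))
      have hA : PySem.List.pyGetD
            (PySem.List.pyGetD (r0 :: r1 :: rs) (((r0 :: r1 :: rs).length : Int) - 2) [])
            (k : Int) 0 = h 0 := by
        have hc2 : (((r0 :: r1 :: rs).length : Int) - 2)
            = (((r0 :: r1 :: rs).length - 2 : Nat) : Int) := by simp; omega
        rw [hc2, PySem.List.pyGetD_natCast, PySem.List.pyGetD_natCast]
        exact chain_to_head h (r0 :: r1 :: rs).length hall ((r0 :: r1 :: rs).length - 2) (by simp)
      have hB : ∀ r ∈ r1 :: rs, r.getD k 0 = r0.getD k 0 :=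
        hmem.mpr (chain_to_head h (r0 :: r1 :: rs).length hall)
      rw [hflag, if_pos rfl, if_pos hB, hA]
      simp [hh]
    · -- some adjacent rows differ at column k: A's flag is false, some row disagrees with r0
      push Not at hall
      obtain ⟨j, hj1, hj2⟩ := hall
      have hflag : (List.range ((r0 :: r1 :: rs).length - 1)).all
          (fun j : Nat => decide ¬(PySem.List.pyGetD (PySem.List.pyGetD (r0 :: r1 :: rs) (j : Int) []) (k : Int) 0 ≠
            PySem.List.pyGetD (PySem.List.pyGetD (r0 :: r1 :: rs) ((j : Int) + 1) []) (k : Int) 0)) = false := by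
        rw [List.all_eq_false]
        refine ⟨j, List.mem_range.mpr (by omega), ?_⟩
        simp only [ne_eq, Decidable.not_not, decide_eq_true_eq]
        exact fun he => hj2 ((hstep j).mp he)
      have hB : ¬ ∀ r ∈ r1 :: rs, r.getD k 0 = r0.getD k 0 := by
        intro hc
        have := hmem.mp hc
        exact hj2 ((this j (by omega)).trans (this (j + 1) hj1).symm)
      rw [hflag, if_neg (by simp), if_neg hB]

-- ===== VERDICT (by name: the statement is the Claim_ definition above) =====
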